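-- pv_equiv track=rewrite | github.com/wandip/Impactful-Resume | cpgn_utils_baseline.py | deleaf
-- ===== SOURCE A (Python) =====
-- def is_paren(tok):
--     return tok == ")" or tok == "("
--
-- def deleaf(tree):
--     nonleaves = ''
--     for w in str(tree).replace('\n', '').split():
--         w = w.replace('(', '( ').replace(')', ' )')
--         nonleaves += w + ' '
--
--     arr = nonleaves.split()
--     for n, i in enumerate(arr):
--         if n + 1 < len(arr):
--             tok1 = arr[n]
--             tok2 = arr[n + 1]
--             if not is_paren(tok1) and not is_paren(tok2):
--                 arr[n + 1] = ""
--
--     nonleaves = " ".join(arr)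
--     return nonleaves.split() + ['EOP']
-- ===== SOURCE B (Python) =====
-- def is_paren(tok):
--     return tok == ")" or tok == "("
--
-- def deleaf(tree):
--     # Tokenize with one global replace chain, then emit maximal runs:
--     # a paren run is copied whole, a word run contributes only its head.
--     toks = str(tree).replace('\n', '').replace('(', '( ').replace(')', ' )').split()
--     out = []
--     i, n = 0, len(toks)
--     while i < n:
--         j = i + 1
--         if is_paren(toks[i]):
--             while j < n and is_paren(toks[j]):
--                 j += 1
--             out.extend(toks[i:j])
--         else:
--             while j < n and not is_paren(toks[j]):
--                 j += 1
--             out.append(toks[i])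
--         i = j
--     out.append('EOP')
--     return out
-- ===== Notes on version B (the rewrite author's own statement) =====
-- stated objective: alternative
-- what changed: A pads parens word by word while concatenating a string, re-splits it, blanks the second token of every word-word pair in an index loop with look-ahead, then rejoins and splits again; B tokenizes with one global replace chain and then segments the token list into maximal paren/word runs with a two-level index loop, copying each paren run whole and emitting only the head of each word run.
import Mathlib
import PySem

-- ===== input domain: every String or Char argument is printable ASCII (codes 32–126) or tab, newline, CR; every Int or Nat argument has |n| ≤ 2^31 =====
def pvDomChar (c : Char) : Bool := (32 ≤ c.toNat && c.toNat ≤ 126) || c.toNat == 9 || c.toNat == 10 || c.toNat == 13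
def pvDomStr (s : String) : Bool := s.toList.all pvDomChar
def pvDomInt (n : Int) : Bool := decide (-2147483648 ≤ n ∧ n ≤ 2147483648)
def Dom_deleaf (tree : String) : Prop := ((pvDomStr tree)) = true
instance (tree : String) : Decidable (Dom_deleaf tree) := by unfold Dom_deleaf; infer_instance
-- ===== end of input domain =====

-- B replaces A's per-word padding + look-ahead blanking + rejoin/resplit by one global
-- replace chain and a run-segmentation loop over maximal paren/word runs (objective: alternative).

-- ===== PORT A =====
-- is_paren(tok)
def isParen (tok : List Char) : Bool := tok == [')'] || tok == ['(']

def deleaf (tree : String) : List String :=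
  -- nonleaves = ''; for w in str(tree).replace('\n','').split(): nonleaves += w.replace('(','( ').replace(')',' )') + ' '
  let words := PySem.Chars.split₀ (PySem.Chars.replace tree.toList ['\n'] [])
  let nonleaves := words.foldl
    (fun acc w =>
      acc ++ (PySem.Chars.replace (PySem.Chars.replace w ['('] ['(', ' ']) [')'] [' ', ')'] ++ [' '])) []
  -- arr = nonleaves.split(); for n, i in enumerate(arr): blank arr[n+1] between two non-parens
  let arr := PySem.Chars.split₀ nonleaves
  let arr2 := (List.range arr.length).foldl
    (fun a n =>
      if n + 1 < a.length then
        let tok1 := a.getD n []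
        let tok2 := a.getD (n + 1) []
        if ¬ isParen tok1 = true ∧ ¬ isParen tok2 = true then a.set (n + 1) [] else a
      else a) arr
  -- nonleaves = " ".join(arr); return nonleaves.split() + ['EOP']
  ((PySem.Chars.split₀ (PySem.Chars.join [' '] arr2)).map (fun t => String.ofList t)) ++ ["EOP"]

-- ===== PORT B =====
-- inner 'while j < n and is_paren(toks[j]) == p: j += 1' (one helper for both inner loops);
-- the fuel argument only makes the loop total (toks.length steps always suffice)
def runEnd (toks : List (List Char)) (p : Bool) : Nat → Nat → Nat
  | 0, j => j
  | fuel + 1, j =>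
    if j < toks.length ∧ isParen (toks.getD j []) = p then runEnd toks p fuel (j + 1) else j

-- outer 'while i < n' loop (fuel again only a totality guard: i grows by ≥ 1 per iteration);
-- out.extend(toks[i:j]) is the slice toks[i:j] (0 ≤ i ≤ j), exact as drop/take
def seg (toks : List (List Char)) : Nat → Nat → List (List Char)
  | 0, _ => []
  | fuel + 1, i =>
    if i < toks.length then
      let t := toks.getD i []
      if isParen t then
        let j := runEnd toks true toks.length (i + 1)
        ((toks.drop i).take (j - i)) ++ seg toks fuel j
      else
        let j := runEnd toks false toks.length (i + 1)
        t :: seg toks fuel j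
    else []

def deleaf_alt (tree : String) : List String :=
  -- toks = str(tree).replace('\n','').replace('(','( ').replace(')',' )').split()
  let toks := PySem.Chars.split₀
    (PySem.Chars.replace
      (PySem.Chars.replace (PySem.Chars.replace tree.toList ['\n'] []) ['('] ['(', ' '])
      [')'] [' ', ')'])
  ((seg toks toks.length 0).map (fun t => String.ofList t)) ++ ["EOP"]

-- ===== PRECONDITION & SPEC =====
def Spec_deleaf (tree : String) (out : List String) : Prop := out = deleaf_alt tree
instance (tree : String) (out : List String) : Decidable (Spec_deleaf tree out) := by unfold Spec_deleaf; infer_instance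

-- ===== CLAIM (what is proved, stated in full; the proofs are below) =====
def Claim_equal_deleaf : Prop := ∀ (tree : String), Dom_deleaf tree → Spec_deleaf tree (deleaf tree)


-- ===== LEMMAS AND PROOFS =====

-- the common middle result: keep a token unless its predecessor and it are both words
def go2 (b : Bool) : List (List Char) → List (List Char)
  | [] => []
  | t :: ts => (if ¬ b = true ∧ ¬ isParen t = true then ([] : List Char) else t) :: go2 (isParen t) ts

-- the loop body of port A, named for the proofs
def stepA (a : List (List Char)) (n : Nat) : List (List Char) :=
  if n + 1 < a.length then
    let tok1 := a.getD n []
    let tok2 := a.getD (n + 1) []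
    if ¬ isParen tok1 = true ∧ ¬ isParen tok2 = true then a.set (n + 1) [] else a
  else a

-- keep a token iff it is a paren or its predecessor was not a word (state b = "previous token was a paren or start")
def keepK (b : Bool) : List (List Char) → List (List Char)
  | [] => []
  | t :: ts => if ¬ b = true ∧ ¬ isParen t = true then keepK false ts else t :: keepK (isParen t) ts

-- the char-level expansion both tokenizations perform: '(' ↦ "( ", ')' ↦ " )", else the char itself
def padH (c : Char) : List Char :=
  if c = '(' then ['(', ' '] else if c = ')' then [' ', ')'] else [c]

theorem go_acc (s cur acc) : PySem.Chars.split₀.go s cur acc = acc.reverse ++ PySem.Chars.split₀.go s cur [] := by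
  induction s generalizing cur acc with
  | nil => by_cases h : cur.isEmpty <;> simp [PySem.Chars.split₀.go, h]
  | cons c rest ih =>
    by_cases hs : PySem.Chars.isspace c <;> by_cases h : cur.isEmpty <;>
      simp only [PySem.Chars.split₀.go, hs, h, if_true, if_false, Bool.false_eq_true]
    · exact ih _ _
    · rw [ih [] (cur.reverse :: acc), ih [] [cur.reverse]]; simp
    · exact ih _ _
    · exact ih _ _

theorem go_nonspace_pre (s rest cur acc) (h : ∀ c ∈ s, PySem.Chars.isspace c = false) :
    PySem.Chars.split₀.go (s ++ rest) cur acc = PySem.Chars.split₀.go rest (s.reverse ++ cur) acc := by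
  induction s generalizing cur with
  | nil => rfl
  | cons c s' ih =>
    have hc : PySem.Chars.isspace c = false := h c (by simp)
    conv_lhs => rw [List.cons_append, PySem.Chars.split₀.go]
    simp only [hc, Bool.false_eq_true, if_false]
    rw [ih _ (fun d hd => h d (by simp [hd])), List.reverse_cons, List.append_assoc]
    rfl

theorem split₀_nonspace (x : List Char) (h : ∀ c ∈ x, PySem.Chars.isspace c = false) :
    PySem.Chars.split₀ x = if x.isEmpty then [] else [x] := by
  have := go_nonspace_pre x [] [] [] h
  rw [List.append_nil] at this
  rw [PySem.Chars.split₀, this, PySem.Chars.split₀.go]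
  cases x <;> simp

theorem go_append_space (u v : List Char) (s : Char) (hsp : PySem.Chars.isspace s = true) (cur) :
    PySem.Chars.split₀.go (u ++ s :: v) cur [] = PySem.Chars.split₀.go u cur [] ++ PySem.Chars.split₀.go v [] [] := by
  induction u generalizing cur with
  | nil =>
    cases cur with
    | nil => simp [PySem.Chars.split₀.go, hsp]
    | cons a b =>
      simp only [List.nil_append, PySem.Chars.split₀.go, hsp, if_true, List.isEmpty_cons,
        Bool.false_eq_true, if_false]
      rw [go_acc v [] [(a :: b).reverse]]
  | cons c u' ih =>
    by_cases hs : PySem.Chars.isspace c <;> by_cases h : cur.isEmpty <;>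
      simp only [List.cons_append, PySem.Chars.split₀.go, hs, h, if_true, if_false, Bool.false_eq_true]
    all_goals first
      | exact ih _
      | (rw [go_acc (u' ++ s :: v) [] [cur.reverse], go_acc u' [] [cur.reverse], ih]; simp)

theorem split₀_append_space (u v : List Char) (s : Char) (hsp : PySem.Chars.isspace s = true) :
    PySem.Chars.split₀ (u ++ s :: v) = PySem.Chars.split₀ u ++ PySem.Chars.split₀ v :=
  go_append_space u v s hsp []

theorem split₀_space_cons (s : Char) (x : List Char) (hsp : PySem.Chars.isspace s = true) :
    PySem.Chars.split₀ (s :: x) = PySem.Chars.split₀ x := by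
  rw [PySem.Chars.split₀, PySem.Chars.split₀.go]
  simp [hsp, PySem.Chars.split₀]

theorem go_props (s cur acc) (hcur : ∀ c ∈ cur, PySem.Chars.isspace c = false)
    (hacc : ∀ t ∈ acc, t ≠ [] ∧ ∀ c ∈ t, PySem.Chars.isspace c = false) :
    ∀ t ∈ PySem.Chars.split₀.go s cur acc, t ≠ [] ∧ ∀ c ∈ t, PySem.Chars.isspace c = false := by
  induction s generalizing cur acc with
  | nil =>
    intro t ht
    by_cases h : cur.isEmpty <;> simp only [PySem.Chars.split₀.go, h, if_true, Bool.false_eq_true, if_false] at ht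
    · exact hacc t (by simpa using ht)
    · simp only [List.reverse_cons] at ht
      rcases (by simpa using ht) with h1 | h2
      · exact hacc t h1
      · subst h2
        exact ⟨by simpa [List.isEmpty_iff] using h, fun c hc => hcur c (by simpa using hc)⟩
  | cons c rest ih =>
    intro t ht
    by_cases hs : PySem.Chars.isspace c <;> by_cases h : cur.isEmpty <;>
      simp only [PySem.Chars.split₀.go, hs, h, if_true, Bool.false_eq_true, if_false] at ht
    · exact ih [] acc (by simp) hacc t ht
    · refine ih [] (cur.reverse :: acc) (by simp) ?_ t ht
      intro u hu
      rcases List.mem_cons.mp hu with h1 | h1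
      · subst h1
        exact ⟨by simpa [List.isEmpty_iff] using h, fun d hd => hcur d (by simpa using hd)⟩
      · exact hacc u h1
    · refine ih (c :: cur) acc ?_ hacc t ht
      intro d hd
      rcases List.mem_cons.mp hd with h1 | h1
      · subst h1; simpa using hs
      · exact hcur d h1
    · refine ih (c :: cur) acc ?_ hacc t ht
      intro d hd
      rcases List.mem_cons.mp hd with h1 | h1
      · subst h1; simpa using hs
      · exact hcur d h1

theorem split₀_props (s : List Char) :
    ∀ t ∈ PySem.Chars.split₀ s, t ≠ [] ∧ ∀ c ∈ t, PySem.Chars.isspace c = false :=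
  go_props s [] [] (by simp) (by simp)

theorem split₀_join (l : List (List Char)) (h : ∀ t ∈ l, ∀ c ∈ t, PySem.Chars.isspace c = false) :
    PySem.Chars.split₀ (PySem.Chars.join [' '] l) = l.filter (· ≠ []) := by
  induction l with
  | nil => simp [PySem.Chars.join_nil]; rfl
  | cons x t ih =>
    cases t with
    | nil =>
      rw [PySem.Chars.join_singleton, split₀_nonspace x (h x (by simp))]
      cases x <;> simp
    | cons y t' =>
      rw [PySem.Chars.join_cons_cons, List.append_assoc, List.singleton_append,
        split₀_append_space _ _ ' ' rfl,
        split₀_nonspace x (h x (by simp)),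
        ih (fun u hu c hc => h u (by simp [hu]) c hc)]
      cases x <;> simp

theorem split₀_flatMap {α : Type} (g : α → List Char) (ws : List α) :
    PySem.Chars.split₀ (ws.flatMap (fun w => g w ++ [' '])) = ws.flatMap (fun w => PySem.Chars.split₀ (g w)) := by
  induction ws with
  | nil => rfl
  | cons w ws ih =>
    rw [List.flatMap_cons, List.append_assoc, List.singleton_append,
      split₀_append_space _ _ ' ' rfl, ih, List.flatMap_cons]

theorem isParen_ite (b : Bool) (t : List Char) :
    isParen (if ¬ b = true ∧ ¬ isParen t = true then ([] : List Char) else t) = isParen t := by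
  split_ifs with h
  · rcases h with ⟨_, h2⟩
    simp [isParen] at h2 ⊢
    tauto
  · rfl

theorem loopA (ts fin : List (List Char)) (h : fin ≠ []) :
    (List.range' (fin.length - 1) (ts.length + 1)).foldl stepA (fin ++ ts)
      = fin ++ go2 (isParen (fin.getLast h)) ts := by
  induction ts generalizing fin with
  | nil =>
    have hp := List.length_pos_of_ne_nil h
    simp only [stepA, go2, List.range'_succ, List.foldl_cons, List.append_nil]
    rw [if_neg (by omega)]
    simp
  | cons t ts' ih =>
    rw [List.range'_succ, List.foldl_cons]
    have hlen : fin.length - 1 + 1 = fin.length := Nat.succ_pred_eq_of_pos (List.length_pos_of_ne_nil h)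
    have hlt : fin.length - 1 + 1 < (fin ++ t :: ts').length := by
      simp [hlen]
    have hget1 : (fin ++ t :: ts').getD (fin.length - 1) [] = fin.getLast h := by
      rw [List.getD_append _ _ _ _ (by omega), List.getLast_eq_getElem, List.getD_eq_getElem _ _ (by omega)]
    have hget2 : (fin ++ t :: ts').getD (fin.length - 1 + 1) [] = t := by
      rw [hlen, List.getD_append_right _ _ _ _ (le_refl _)]
      simp
    have hset : ∀ v, (fin ++ t :: ts').set (fin.length - 1 + 1) v = (fin ++ [v]) ++ ts' := by
      intro v
      rw [hlen, List.set_append_right _ _ (le_refl _)]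
      simp
    rw [stepA, if_pos hlt, hget1, hget2]
    set v := if ¬ isParen (fin.getLast h) = true ∧ ¬ isParen t = true then ([] : List Char) else t with hv
    have hbody : (if ¬ isParen (fin.getLast h) = true ∧ ¬ isParen t = true then (fin ++ t :: ts').set (fin.length - 1 + 1) [] else fin ++ t :: ts')
        = (fin ++ [v]) ++ ts' := by
      rw [hv]; split_ifs with hc
      · rw [hset]
      · show fin ++ t :: ts' = (fin ++ [t]) ++ ts'
        simp
    rw [hbody]
    have h2 : fin ++ [v] ≠ [] := by simp
    have hlast2 : (fin ++ [v]).getLast h2 = v := by simp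
    have hlen2 : (fin ++ [v]).length - 1 = fin.length - 1 + 1 := by simp [hlen]
    have := ih (fin ++ [v]) h2
    rw [hlen2] at this
    simp only [List.length_cons]
    rw [this, hlast2, hv]
    rw [go2]
    simp only [isParen_ite]
    simp

theorem go2_mem (b : Bool) (ts : List (List Char)) :
    ∀ u ∈ go2 b ts, u = [] ∨ u ∈ ts := by
  induction ts generalizing b with
  | nil => simp [go2]
  | cons t ts' ih =>
    intro u hu
    rw [go2] at hu
    rcases List.mem_cons.mp hu with h1 | h1
    · split_ifs at h1
      · exact Or.inl h1
      · exact Or.inr (by simp [h1])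
    · rcases ih (isParen t) u h1 with h2 | h2
      · exact Or.inl h2
      · exact Or.inr (by simp [h2])

theorem go2_true_cons (t : List Char) (ts : List (List Char)) :
    go2 true (t :: ts) = t :: go2 (isParen t) ts := by
  rw [go2]; simp

-- A's blank-then-filter pass equals the keep function (tokens are nonempty)
theorem filter_go2 (b : Bool) (ts : List (List Char)) (h : ∀ t ∈ ts, t ≠ []) :
    (go2 b ts).filter (· ≠ []) = keepK b ts := by
  induction ts generalizing b with
  | nil => rfl
  | cons t ts' ih =>
    have ht : t ≠ [] := h t (by simp)
    have h' : ∀ u ∈ ts', u ≠ [] := fun u hu => h u (by simp [hu])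
    rw [go2, keepK]
    by_cases hc : ¬ b = true ∧ ¬ isParen t = true
    · have hp : isParen t = false := by rcases hc with ⟨_, h2⟩; simpa using h2
      rw [if_pos hc, if_pos hc, List.filter_cons_of_neg (by simp), ih _ h', hp]
    · rw [if_neg hc, if_neg hc, List.filter_cons_of_pos (by simpa using ht), ih _ h']

-- single-char str.replace is a per-char expansion
theorem replace_go_single (c : Char) (r : List Char) (l acc : List Char) (fuel : Nat) (h : l.length ≤ fuel) :
    PySem.Chars.replace.go [c] r fuel l acc
      = acc.reverse ++ l.flatMap (fun d => if d = c then r else [d]) := by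
  induction l generalizing acc fuel with
  | nil => cases fuel <;> simp [PySem.Chars.replace.go]
  | cons d t ih =>
    cases fuel with
    | zero => simp at h
    | succ f =>
      rw [PySem.Chars.replace.go]
      by_cases hd : d = c
      · subst hd
        rw [if_pos (by simp [List.isPrefixOf])]
        simp only [List.length_cons, List.length_nil, List.drop_succ_cons, List.drop_zero]
        simp only [List.length_cons] at h
        rw [ih (r.reverse ++ acc) f (by omega)]
        simp
      · rw [if_neg (by simp [List.isPrefixOf]; exact fun hh => hd hh.symm)]
        simp only [List.length_cons] at h
        rw [ih (d :: acc) f (by omega)]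
        simp [hd]

theorem replace_single (s : List Char) (c : Char) (r : List Char) :
    PySem.Chars.replace s [c] r = s.flatMap (fun d => if d = c then r else [d]) := by
  rw [PySem.Chars.replace]
  simp only [List.isEmpty_cons, Bool.false_eq_true, if_false]
  exact replace_go_single c r s [] s.length (le_refl _)

-- the two one-sided paddings compose into the per-char expansion padH
theorem replace_pad (u : List Char) :
    PySem.Chars.replace (PySem.Chars.replace u ['('] ['(', ' ']) [')'] [' ', ')'] = u.flatMap padH := by
  rw [replace_single, replace_single, List.flatMap_assoc]
  congr 1
  funext c
  by_cases h1 : c = '(' <;> by_cases h2 : c = ')' <;> simp [h1, h2, padH]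

theorem padH_space (c : Char) (h : PySem.Chars.isspace c = true) : padH c = [c] := by
  rw [padH, if_neg, if_neg]
  · rintro rfl; exact absurd h (by decide)
  · rintro rfl; exact absurd h (by decide)

theorem dropWhile_head_false {α : Type} (p : α → Bool) (l : List α) (s : α) (r : List α)
    (h : l.dropWhile p = s :: r) : p s = false := by
  induction l with
  | nil => simp at h
  | cons x xs ih =>
    rw [List.dropWhile_cons] at h
    split_ifs at h with hx
    · exact ih h
    · cases h; simpa using hx

-- a nonempty all-nonspace prefix followed by nothing or a space is the first word
theorem split₀_word (w rest : List Char) (hw : w ≠ []) (hns : ∀ c ∈ w, PySem.Chars.isspace c = false)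
    (hrest : rest = [] ∨ ∃ s rest', rest = s :: rest' ∧ PySem.Chars.isspace s = true) :
    PySem.Chars.split₀ (w ++ rest) = w :: PySem.Chars.split₀ rest := by
  rw [PySem.Chars.split₀, go_nonspace_pre w rest [] [] hns, List.append_nil]
  rcases hrest with rfl | ⟨s, rest', rfl, hs⟩
  · rw [PySem.Chars.split₀.go]
    simp [List.isEmpty_iff, hw, PySem.Chars.split₀, PySem.Chars.split₀.go]
  · rw [PySem.Chars.split₀.go]
    simp only [hs, if_true, List.isEmpty_iff, List.reverse_eq_nil_iff]
    rw [if_neg hw]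
    rw [go_acc rest' [] [w.reverse.reverse], List.reverse_reverse]
    rw [split₀_space_cons s rest' hs]
    simp [PySem.Chars.split₀]

-- THE tokenization lemma: one global padding pass tokenizes like padding word by word
theorem tok_global (u : List Char) :
    PySem.Chars.split₀ (u.flatMap padH)
      = (PySem.Chars.split₀ u).flatMap (fun w => PySem.Chars.split₀ (w.flatMap padH)) := by
  match u with
  | [] => rfl
  | c :: u' =>
    by_cases hsp : PySem.Chars.isspace c = true
    · rw [List.flatMap_cons, padH_space c hsp, List.singleton_append,
        split₀_space_cons c _ hsp, split₀_space_cons c u' hsp]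
      exact tok_global u'
    · have hc : PySem.Chars.isspace c = false := by simpa using hsp
      set p : Char → Bool := fun d => !(PySem.Chars.isspace d) with hp
      set w : List Char := c :: u'.takeWhile p with hwdef
      set rest : List Char := u'.dropWhile p with hrdef
      have hu : c :: u' = w ++ rest := by
        rw [hwdef, hrdef, List.cons_append, List.takeWhile_append_dropWhile]
      have hwne : w ≠ [] := by simp [hwdef]
      have hwns : ∀ d ∈ w, PySem.Chars.isspace d = false := by
        intro d hd
        rcases List.mem_cons.mp hd with rfl | hd2
        · exact hc
        · have := List.mem_takeWhile_imp hd2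
          rw [hp] at this; simpa using this
      have hrest : rest = [] ∨ ∃ s rest', rest = s :: rest' ∧ PySem.Chars.isspace s = true := by
        cases hr : rest with
        | nil => exact Or.inl rfl
        | cons s rest' =>
          refine Or.inr ⟨s, rest', rfl, ?_⟩
          have := dropWhile_head_false p u' s rest' (by rw [← hrdef]; exact hr)
          rw [hp] at this
          simpa using this
      rw [hu, split₀_word w rest hwne hwns hrest, List.flatMap_append]
      conv_rhs => rw [List.flatMap_cons]
      rcases hrest with hre | ⟨s, rest', hre, hs⟩
      · rw [hre]; simp [PySem.Chars.split₀, PySem.Chars.split₀.go]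
      · have hlt : rest'.length < (c :: u').length := by
          have : rest.length ≤ u'.length := by rw [hrdef]; exact List.length_dropWhile_le _ _
          rw [hre] at this; simp at this ⊢; omega
        have hfr : List.flatMap padH rest = s :: List.flatMap padH rest' := by
          rw [hre, List.flatMap_cons, padH_space s hs, List.singleton_append]
        rw [hfr, split₀_append_space _ _ s hs, hre, split₀_space_cons s rest' hs,
          tok_global rest']
termination_by u.length
decreasing_by
  · simp
  · exact hlt

-- runEnd facts
theorem runEnd_ge (toks : List (List Char)) (p : Bool) (fuel : Nat) :
    ∀ j, j ≤ runEnd toks p fuel j := by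
  induction fuel with
  | zero => intro j; simp [runEnd]
  | succ f ih =>
    intro j
    rw [runEnd]
    split_ifs with hc
    · have := ih (j + 1); omega
    · exact le_refl j

theorem runEnd_le (toks : List (List Char)) (p : Bool) (fuel : Nat) :
    ∀ j, j ≤ toks.length → runEnd toks p fuel j ≤ toks.length := by
  induction fuel with
  | zero => intro j h; simpa [runEnd] using h
  | succ f ih =>
    intro j h
    rw [runEnd]
    split_ifs with hc
    · exact ih (j + 1) (by omega)
    · exact h

theorem runEnd_run (toks : List (List Char)) (p : Bool) (fuel : Nat) :
    ∀ j k, j ≤ k → k < runEnd toks p fuel j → isParen (toks.getD k []) = p := by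
  induction fuel with
  | zero => intro j k h1 h2; simp [runEnd] at h2; omega
  | succ f ih =>
    intro j k h1 h2
    rw [runEnd] at h2
    split_ifs at h2 with hc
    · rcases Nat.eq_or_lt_of_le h1 with rfl | h
      · exact hc.2
      · exact ih (j + 1) k h h2
    · omega

theorem runEnd_max (toks : List (List Char)) (p : Bool) (fuel : Nat) :
    ∀ j, toks.length ≤ j + fuel → runEnd toks p fuel j < toks.length →
      ¬ isParen (toks.getD (runEnd toks p fuel j) []) = p := by
  induction fuel with
  | zero => intro j hf h; simp [runEnd] at h; omega
  | succ f ih =>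
    intro j hf h
    rw [runEnd] at h ⊢
    split_ifs at h ⊢ with hc
    · exact ih (j + 1) (by omega) h
    · intro hp
      exact hc ⟨h, hp⟩

-- stepping keepK over a word: the word is dropped in state false
theorem keepK_word_run (toks : List (List Char)) (j k : Nat) (hk : k ≤ j) (hj : j ≤ toks.length)
    (hrun : ∀ m, k ≤ m → m < j → isParen (toks.getD m []) = false) :
    keepK false (toks.drop k) = keepK false (toks.drop j) := by
  rcases Nat.eq_or_lt_of_le hk with rfl | hlt
  · rfl
  · have hkL : k < toks.length := by omega
    rw [List.drop_eq_getElem_cons hkL, keepK]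
    have hpk : isParen toks[k] = false := by
      have := hrun k (le_refl k) hlt
      rwa [List.getD_eq_getElem _ _ hkL] at this
    rw [if_pos (by simp [hpk])]
    exact keepK_word_run toks j (k + 1) (by omega) hj (fun m hm1 hm2 => hrun m (by omega) hm2)
termination_by j - k

-- in state false, a leading paren (or the end) behaves like state true
theorem keepK_false_true (ts : List (List Char))
    (h : ts = [] ∨ isParen (ts.headD []) = true) :
    keepK false ts = keepK true ts := by
  rcases h with rfl | hp
  · rfl
  · cases ts with
    | nil => rfl
    | cons t ts' =>
      simp only [List.headD_cons] at hp
      rw [keepK, keepK, if_neg (by simp [hp]), if_neg (by simp)]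

-- copying a paren run whole agrees with keepK
theorem keepK_paren_run (toks : List (List Char)) (j k : Nat) (hk : k ≤ j) (hj : j ≤ toks.length)
    (hrun : ∀ m, k ≤ m → m < j → isParen (toks.getD m []) = true) :
    keepK true (toks.drop k) = (toks.drop k).take (j - k) ++ keepK true (toks.drop j) := by
  rcases Nat.eq_or_lt_of_le hk with rfl | hlt
  · simp
  · have hkL : k < toks.length := by omega
    have hpk : isParen toks[k] = true := by
      have := hrun k (le_refl k) hlt
      rwa [List.getD_eq_getElem _ _ hkL] at this
    rw [List.drop_eq_getElem_cons hkL, keepK, if_neg (by simp [hpk]), hpk]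
    have ih := keepK_paren_run toks j (k + 1) (by omega) hj (fun m hm1 hm2 => hrun m (by omega) hm2)
    rw [ih]
    have hjk : j - k = (j - (k + 1)) + 1 := by omega
    rw [hjk, List.take_succ_cons]
    simp
termination_by j - k

-- B's segmentation loop equals keepK from the start state (fuel suffices when length ≤ i + fuel)
theorem seg_eq_keepK (toks : List (List Char)) (fuel : Nat) :
    ∀ i, toks.length ≤ i + fuel → seg toks fuel i = keepK true (toks.drop i) := by
  induction fuel with
  | zero =>
    intro i hf
    rw [seg, List.drop_eq_nil_of_le (by omega)]
    rfl
  | succ f ih =>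
    intro i hf
    rw [seg]
    split_ifs with hi
    · have hti : toks.getD i [] = toks[i] := List.getD_eq_getElem _ _ hi
      by_cases hp : isParen (toks.getD i []) = true
      · rw [if_pos hp]
        have hge := runEnd_ge toks true toks.length (i + 1)
        have hle := runEnd_le toks true toks.length (i + 1) (by omega)
        set j := runEnd toks true toks.length (i + 1) with hj
        show List.take (j - i) (List.drop i toks) ++ seg toks f j = keepK true (List.drop i toks)
        rw [ih j (by omega)]
        have hrun : ∀ m, i ≤ m → m < j → isParen (toks.getD m []) = true := by
          intro m hm1 hm2
          rcases Nat.eq_or_lt_of_le hm1 with rfl | hmlt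
          · exact hp
          · exact runEnd_run toks true toks.length (i + 1) m hmlt hm2
        exact (keepK_paren_run toks j i (by omega) hle hrun).symm
      · rw [if_neg hp]
        have hge := runEnd_ge toks false toks.length (i + 1)
        have hle := runEnd_le toks false toks.length (i + 1) (by omega)
        set j := runEnd toks false toks.length (i + 1) with hj
        have hpf : isParen toks[i] = false := by rw [← hti]; simpa using hp
        show toks.getD i [] :: seg toks f j = keepK true (List.drop i toks)
        rw [ih j (by omega)]
        conv_rhs => rw [List.drop_eq_getElem_cons hi, keepK]
        rw [if_neg (by simp), hti, hpf]
        congr 1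
        have hrun : ∀ m, i + 1 ≤ m → m < j → isParen (toks.getD m []) = false :=
          fun m hm1 hm2 => runEnd_run toks false toks.length (i + 1) m hm1 hm2
        rw [keepK_word_run toks j (i + 1) hge hle hrun]
        refine (keepK_false_true (toks.drop j) ?_).symm
        rcases Nat.eq_or_lt_of_le hle with heq | hjlt
        · exact Or.inl (by rw [heq]; simp)
        · refine Or.inr ?_
          have := runEnd_max toks false toks.length (i + 1) (by omega) (by rw [← hj]; exact hjlt)
          rw [← hj] at this
          rw [List.drop_eq_getElem_cons hjlt, List.headD_cons]
          have h2 : toks.getD j [] = toks[j] := List.getD_eq_getElem _ _ hjlt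
          rw [h2] at this
          cases hpp : isParen toks[j]
          · exact absurd hpp this
          · rfl
    · rw [List.drop_eq_nil_of_le (by omega)]
      rfl

-- ===== VERDICT (by name: the statement is the Claim_ definition above) =====
theorem deleaf_spec : Claim_equal_deleaf := by
  intro tree _
  unfold Spec_deleaf deleaf deleaf_alt
  simp only []
  set u := PySem.Chars.replace tree.toList ['\n'] [] with hu
  set ws := PySem.Chars.split₀ u with hws
  have h1 : ws.foldl (fun acc w => acc ++ ((PySem.Chars.replace (PySem.Chars.replace w ['('] ['(', ' ']) [')'] [' ', ')']) ++ [' '])) []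
      = ws.flatMap (fun w => (PySem.Chars.replace (PySem.Chars.replace w ['('] ['(', ' ']) [')'] [' ', ')']) ++ [' ']) := by
    rw [PySem.List.foldl_append_eq_flatMap
      (fun w => (PySem.Chars.replace (PySem.Chars.replace w ['('] ['(', ' ']) [')'] [' ', ')']) ++ [' ']) ws []]
    rfl
  rw [h1, split₀_flatMap (fun w => PySem.Chars.replace (PySem.Chars.replace w ['('] ['(', ' ']) [')'] [' ', ')']) ws]
  have hpad : (fun w => PySem.Chars.split₀ (PySem.Chars.replace (PySem.Chars.replace w ['('] ['(', ' ']) [')'] [' ', ')']))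
      = fun w => PySem.Chars.split₀ (w.flatMap padH) := by
    funext w; rw [replace_pad]
  rw [hpad]
  set toks := ws.flatMap (fun w => PySem.Chars.split₀ (w.flatMap padH)) with htoks
  have htokB : PySem.Chars.split₀ (PySem.Chars.replace (PySem.Chars.replace u ['('] ['(', ' ']) [')'] [' ', ')']) = toks := by
    rw [replace_pad, tok_global, htoks, hws]
  rw [htokB]
  have htokprops : ∀ t ∈ toks, t ≠ [] ∧ ∀ c ∈ t, PySem.Chars.isspace c = false := by
    intro t ht
    rw [htoks] at ht
    rcases List.mem_flatMap.mp ht with ⟨w, _, hw2⟩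
    exact split₀_props _ t hw2
  -- A's index loop equals go2 true
  have hloop : (List.range toks.length).foldl
      (fun a n =>
        if n + 1 < a.length then
          let tok1 := a.getD n []
          let tok2 := a.getD (n + 1) []
          if ¬ isParen tok1 = true ∧ ¬ isParen tok2 = true then a.set (n + 1) [] else a
        else a) toks = go2 true toks := by
    cases toks with
    | nil => rfl
    | cons t0 ts =>
      have hstep : (fun (a : List (List Char)) (n : Nat) =>
          if n + 1 < a.length then
            let tok1 := a.getD n []
            let tok2 := a.getD (n + 1) []
            if ¬ isParen tok1 = true ∧ ¬ isParen tok2 = true then a.set (n + 1) [] else a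
          else a) = stepA := by
        funext a n
        rfl
      rw [hstep, List.length_cons, List.range_eq_range']
      have := loopA ts [t0] (by simp)
      simp only [List.length_cons, List.length_nil, Nat.zero_add, Nat.sub_self] at this
      rw [List.singleton_append] at this
      rw [this, List.getLast_singleton, go2_true_cons]
      rfl
  rw [hloop]
  have hsp2 : ∀ t ∈ go2 true toks, ∀ c ∈ t, PySem.Chars.isspace c = false := by
    intro t ht c hc
    rcases go2_mem true toks t ht with h2 | h2
    · subst h2; simp at hc
    · exact (htokprops t h2).2 c hc
  rw [split₀_join (go2 true toks) hsp2]
  rw [filter_go2 true toks (fun t ht => (htokprops t ht).1)]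
  rw [seg_eq_keepK toks toks.length 0 (by omega), List.drop_zero]
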